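-- pv_equiv track=rewrite | github.com/nunolourenco/sge3 | sge/sge/grammar.py | python_filter
-- ===== SOURCE A (Python) =====
-- def python_filter(txt):
--     """ Create correct python syntax.
--     We use {: and :} as special open and close brackets, because
--     it's not possible to specify indentation correctly in a BNF
--     grammar without this type of scheme."""
--     txt = txt.replace("\le", "<=")
--     txt = txt.replace("\ge", ">=")
--     txt = txt.replace("\l", "<")
--     txt = txt.replace("\g", ">")
--     txt = txt.replace("\eb", "|")
--     indent_level = 0
--     tmp = txt[:]
--     i = 0
--     while i < len(tmp):
--         tok = tmp[i:i+2]
--         if tok == "{:":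
--             indent_level += 1
--         elif tok == ":}":
--             indent_level -= 1
--         tabstr = "\n" + "  " * indent_level
--         if tok == "{:" or tok == ":}" or tok == "\\n":
--             tmp = tmp.replace(tok, tabstr, 1)
--         i += 1
--         # Strip superfluous blank lines.
--         txt = "\n".join([line for line in tmp.split("\n") if line.strip() != ""])
--     return txt
-- ===== SOURCE B (Python) =====
-- def python_filter(txt):
--     """Single forward pass building the output pieces, instead of repeatedly
--     rewriting a mutating string with replace(...,1)."""
--     for old, new in (("\\le", "<="), ("\\ge", ">="), ("\\l", "<"),
--                      ("\\g", ">"), ("\\eb", "|")):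
--         txt = txt.replace(old, new)
--     out = []
--     indent = 0
--     i = 0
--     n = len(txt)
--     while i < n:
--         tok = txt[i:i+2]
--         if tok == "{:":
--             indent += 1
--             out.append("\n" + "  " * indent)
--             i += 2
--         elif tok == ":}":
--             indent -= 1
--             out.append("\n" + "  " * indent)
--             i += 2
--         elif tok == "\\n":
--             out.append("\n" + "  " * indent)
--             i += 2
--         else:
--             out.append(txt[i])
--             i += 1
--     s = "".join(out)
--     return "\n".join(line for line in s.split("\n") if line.strip() != "")
-- ===== Notes on version B (the rewrite author's own statement) =====
-- stated objective: faster
-- what changed: A repeatedly rewrites a mutating string in place with str.replace(tok, tabstr, 1) (each replacement rescans and copies the whole string) while an index walks through the freshly inserted text, and re-strips blank lines every iteration; B makes one forward pass over the (marker-replaced) input, appending output pieces to a list and joining once, then strips blank lines once at the end.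
import Mathlib
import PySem

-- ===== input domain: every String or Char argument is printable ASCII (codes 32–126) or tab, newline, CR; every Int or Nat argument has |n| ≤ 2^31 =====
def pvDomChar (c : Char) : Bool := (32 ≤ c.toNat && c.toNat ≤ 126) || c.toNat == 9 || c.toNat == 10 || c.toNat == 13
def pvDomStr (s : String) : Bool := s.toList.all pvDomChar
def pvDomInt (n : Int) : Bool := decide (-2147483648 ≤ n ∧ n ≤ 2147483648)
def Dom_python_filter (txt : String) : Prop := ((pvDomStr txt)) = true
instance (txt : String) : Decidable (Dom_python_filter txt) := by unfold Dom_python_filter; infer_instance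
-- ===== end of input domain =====

-- B replaces A's repeated in-place `str.replace(tok, tabstr, 1)` rewriting of a mutating
-- string (quadratic, and blank lines re-stripped every iteration) by a single forward pass
-- that appends output pieces and strips blank lines once (objective: faster, measured);
-- return values are proved equal on all inputs.

-- ===== PORT A =====

-- s.replace(old, new, 1): replace the first occurrence of old (hand port, exact for old ≠ "";
-- A only calls it with two-character old)
def pvReplaceFirst : List Char → List Char → List Char → List Char
  | [], _, _ => []
  | c :: t, old, new =>
    if old.isPrefixOf (c :: t) then new ++ (c :: t).drop old.length
    else c :: pvReplaceFirst t old new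

-- "\n".join([line for line in tmp.split("\n") if line.strip() != ""])
def pvStripBlank (cs : List Char) : List Char :=
  PySem.Chars.join ['\n']
    ((PySem.Chars.splitOn cs ['\n']).filter (fun l => !(PySem.Chars.strip l == [])))

-- the while loop of A: state (tmp, txt, i, indent_level); fuel only makes the same
-- computation total (tmp.length^2 + 1 iterations always suffice, as the proofs below show)
def pvLoopA (fuel : Nat) (tmp txt : List Char) (i : Nat) (indent : Int) : List Char :=
  match fuel with
  | 0 => txt
  | fuel + 1 =>
    if i < tmp.length then
      let tok := (tmp.drop i).take 2           -- tmp[i:i+2] (i is a non-negative index)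
      let indent' : Int :=
        if tok = ['{', ':'] then indent + 1
        else if tok = [':', '}'] then indent - 1
        else indent
      let tabstr := '\n' :: List.replicate (2 * indent'.toNat) ' '   -- "\n" + "  " * indent
      let tmp' :=
        if tok = ['{', ':'] ∨ tok = [':', '}'] ∨ tok = ['\\', 'n'] then
          pvReplaceFirst tmp tok tabstr
        else tmp
      pvLoopA fuel tmp' (pvStripBlank tmp') (i + 1) indent'
    else txt

def python_filter (txt : String) : String :=
  let t1 := PySem.Chars.replace txt.toList ['\\', 'l', 'e'] ['<', '=']
  let t2 := PySem.Chars.replace t1 ['\\', 'g', 'e'] ['>', '=']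
  let t3 := PySem.Chars.replace t2 ['\\', 'l'] ['<']
  let t4 := PySem.Chars.replace t3 ['\\', 'g'] ['>']
  let t5 := PySem.Chars.replace t4 ['\\', 'e', 'b'] ['|']
  String.ofList (pvLoopA (t5.length * t5.length + 1) t5 t5 0 0)

-- ===== PORT B =====

-- the single forward pass of B: tok = txt[i:i+2]; tokens emit "\n" + "  "*indent and consume
-- two characters, everything else is copied
def pvEmit : List Char → Int → List Char
  | [], _ => []
  | [c], _ => [c]                               -- tok has one character: no marker matches
  | c1 :: c2 :: t, indent =>                    -- tok = txt[i:i+2] = [c1, c2]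
    if [c1, c2] = ['{', ':'] then
      '\n' :: (List.replicate (2 * (indent + 1).toNat) ' ' ++ pvEmit t (indent + 1))
    else if [c1, c2] = [':', '}'] then
      '\n' :: (List.replicate (2 * (indent - 1).toNat) ' ' ++ pvEmit t (indent - 1))
    else if [c1, c2] = ['\\', 'n'] then
      '\n' :: (List.replicate (2 * indent.toNat) ' ' ++ pvEmit t indent)
    else c1 :: pvEmit (c2 :: t) indent

def python_filter_alt (txt : String) : String :=
  let t := [(['\\', 'l', 'e'], ['<', '=']), (['\\', 'g', 'e'], ['>', '=']),
            (['\\', 'l'], ['<']), (['\\', 'g'], ['>']),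
            (['\\', 'e', 'b'], ['|'])].foldl
      (fun s p => PySem.Chars.replace s p.1 p.2) txt.toList
  String.ofList (pvStripBlank (pvEmit t 0))

-- ===== PRECONDITION & SPEC =====
def Spec_python_filter (txt : String) (out : String) : Prop := out = python_filter_alt txt
instance (txt : String) (out : String) : Decidable (Spec_python_filter txt out) := by unfold Spec_python_filter; infer_instance

-- ===== CLAIM (what is proved, stated in full; the proofs are below) =====
def Claim_equal_python_filter : Prop := ∀ (txt : String), Dom_python_filter txt → Spec_python_filter txt (python_filter txt)

-- ===== LEMMAS AND PROOFS =====

-- the three marker tokens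
def pvIsTok (l : List Char) : Prop := l = ['{', ':'] ∨ l = [':', '}'] ∨ l = ['\\', 'n']

-- no token occurrence starts strictly before position i of L (A's loop invariant)
def pvNBL (L : List Char) (i : Nat) : Prop :=
  ∀ j, j < i → ∀ tok, pvIsTok tok → ¬ tok <+: L.drop j

lemma pvIsTok_len {tok : List Char} (h : pvIsTok tok) : tok.length = 2 := by
  rcases h with h | h | h <;> subst h <;> rfl

lemma prefix_take_two {tok l : List Char} (hl : tok.length = 2) (h : tok <+: l) :
    tok = l.take 2 := by
  have := List.prefix_iff_eq_take.mp h
  rwa [hl] at this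

-- a space never starts a token, so pvEmit copies a run of spaces unchanged
lemma pvEmit_replicate_space (k : Nat) (suf : List Char) (ind : Int) :
    pvEmit (List.replicate k ' ' ++ suf) ind = List.replicate k ' ' ++ pvEmit suf ind := by
  induction k with
  | zero => simp
  | succ n ih =>
    rw [List.replicate_succ, List.cons_append]
    rcases h : List.replicate n ' ' ++ suf with _ | ⟨c2, t⟩
    · simp only [List.append_eq_nil_iff, List.replicate_eq_nil_iff] at h
      obtain ⟨h1, h2⟩ := h; subst h2; simp [pvEmit, h1]
    · rw [pvEmit]
      have h1 : ¬ [' ', c2] = ['{', ':'] := by simp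
      have h2 : ¬ [' ', c2] = [':', '}'] := by simp
      have h3 : ¬ [' ', c2] = ['\\', 'n'] := by simp
      rw [if_neg h1, if_neg h2, if_neg h3, ← h, ih, List.cons_append]

-- output-size bound, giving the fuel bound for A's loop
lemma pvEmit_len_le : ∀ n (cs : List Char) (ind : Int), cs.length ≤ n →
    (pvEmit cs ind).length ≤ cs.length * (ind.toNat + cs.length) := by
  intro n
  induction n with
  | zero => intro cs ind h; rcases cs with _|_ <;> simp_all [pvEmit]
  | succ n ih =>
    intro cs ind h
    rcases cs with _ | ⟨c1, t⟩
    · simp [pvEmit]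
    · rcases t with _ | ⟨c2, t2⟩
      · simp [pvEmit]
      · rw [pvEmit]
        simp only [List.length_cons] at h ⊢
        split_ifs with h1 h2 h3
        · have := ih t2 (ind + 1) (by omega)
          simp only [List.length_cons, List.length_append, List.length_replicate]
          have hk : (ind + 1).toNat ≤ ind.toNat + 1 := by omega
          nlinarith [this, t2.length.zero_le, ind.toNat.zero_le]
        · have := ih t2 (ind - 1) (by omega)
          simp only [List.length_cons, List.length_append, List.length_replicate]
          have hk : (ind - 1).toNat ≤ ind.toNat := by omega
          nlinarith [this, t2.length.zero_le, ind.toNat.zero_le]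
        · have := ih t2 ind (by omega)
          simp only [List.length_cons, List.length_append, List.length_replicate]
          nlinarith [this, t2.length.zero_le, ind.toNat.zero_le]
        · have := ih (c2 :: t2) ind (by simpa using by omega)
          simp only [List.length_cons] at this ⊢
          nlinarith [this, t2.length.zero_le, ind.toNat.zero_le]

lemma pvEmit_ne_nil {cs : List Char} (h : cs ≠ []) (ind : Int) : pvEmit cs ind ≠ [] := by
  rcases cs with _ | ⟨c1, t⟩
  · simp at h
  · rcases t with _ | ⟨c2, t2⟩
    · simp [pvEmit]
    · rw [pvEmit]; split_ifs <;> simp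

-- Python's replace(old, new, 1) when the first occurrence of old is at position done.length
lemma pvReplaceFirst_append (done old new suf : List Char) (hne : old ≠ [])
    (h : ∀ j, j < done.length → ¬ old <+: (done ++ (old ++ suf)).drop j) :
    pvReplaceFirst (done ++ (old ++ suf)) old new = done ++ (new ++ suf) := by
  induction done with
  | nil =>
    rcases old with _ | ⟨o, ot⟩
    · simp at hne
    · simp only [List.nil_append, List.cons_append, pvReplaceFirst]
      rw [if_pos (List.isPrefixOf_iff_prefix.mpr (by exact List.prefix_append _ _))]
      simp [List.drop_left']
  | cons c d ih =>
    have h0 := h 0 (by simp)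
    simp only [List.cons_append, List.drop_zero] at h0
    rw [List.cons_append, pvReplaceFirst, if_neg (by
      intro hc; exact h0 (List.isPrefixOf_iff_prefix.mp hc))]
    rw [ih (fun j hj => by
      have := h (j + 1) (by simpa using by omega)
      simpa using this)]
    simp

lemma pvNBL_window (done X : List Char) {j : Nat} (hj : j + 2 ≤ done.length)
    {tok : List Char} (h2 : tok.length = 2) (hpre : tok <+: (done ++ X).drop j) :
    tok <+: done.drop j := by
  rw [List.drop_append_of_le_length (by omega)] at hpre
  have h := prefix_take_two h2 hpre
  rw [List.take_append_of_le_length (by simp; omega)] at h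
  rw [h]; exact List.take_prefix _ _

lemma pvDrop_pred (done X : List Char) (h : 0 < done.length) :
    ∃ a, (done ++ X).drop (done.length - 1) = a :: X := by
  have e : (done ++ X).drop (done.length - 1) = done.drop (done.length - 1) ++ X :=
    List.drop_append_of_le_length (by omega)
  have hlen : (done.drop (done.length - 1)).length = 1 := by simp; omega
  obtain ⟨a, ha⟩ := List.length_eq_one_iff.mp hlen
  exact ⟨a, by rw [e, ha]; rfl⟩

-- the master invariant lemma: A's loop at position done.length behaves like B's single pass
-- on the unprocessed suffix
lemma pvLoopA_emit : ∀ fuel (done rest txt : List Char) (ind : Int),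
    pvNBL (done ++ rest) done.length →
    (pvEmit rest ind).length ≤ fuel →
    pvLoopA fuel (done ++ rest) txt done.length ind =
      (if rest = [] then txt else pvStripBlank (done ++ pvEmit rest ind)) := by
  intro fuel
  induction fuel with
  | zero =>
    intro done rest txt ind _ hfuel
    rcases rest with _ | ⟨c1, t⟩
    · simp [pvLoopA]
    · exact absurd (List.length_eq_zero_iff.mp (by omega))
        (pvEmit_ne_nil (List.cons_ne_nil c1 t) ind)
  | succ fuel ih =>
    intro done rest txt ind hNBL hfuel
    rcases rest with _ | ⟨c1, t⟩
    · simp [pvLoopA]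
    · have hlt : done.length < (done ++ c1 :: t).length := by simp
      rw [pvLoopA]
      simp only [List.drop_left, if_pos hlt]
      rcases t with _ | ⟨c2, t2⟩
      · -- a single trailing character: tok = [c1], no marker matches
        have h1 : ¬ ([c1] : List Char).take 2 = ['{', ':'] := by simp
        have h2 : ¬ ([c1] : List Char).take 2 = [':', '}'] := by simp
        have h3 : ¬ ([c1] : List Char).take 2 = ['\\', 'n'] := by simp
        rw [if_neg h1, if_neg h2, if_neg (by simp only [not_or]; exact ⟨h1, h2, h3⟩)]
        have hrec := ih (done ++ [c1]) [] (pvStripBlank (done ++ [c1])) ind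
          (by
            intro j hj tok htok hpre
            simp only [List.append_nil] at hpre
            rcases Nat.lt_or_ge j done.length with hj' | hj'
            · exact hNBL j hj' tok htok hpre
            · have hje : j = done.length := by simp at hj; omega
              subst hje
              rw [List.drop_left] at hpre
              have := hpre.length_le
              rw [pvIsTok_len htok] at this
              simp at this)
          (by simp [pvEmit])
        simp only [List.append_nil, List.length_append, List.length_cons,
          List.length_nil] at hrec
        rw [hrec]
        simp [pvEmit]
      · -- tok = [c1, c2]
        by_cases h1 : ([c1, c2] : List Char) = ['{', ':']
        · obtain ⟨rfl, rfl⟩ : c1 = '{' ∧ c2 = ':' := by simpa using h1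
          simp only [List.take_succ_cons, List.take_zero, List.cons.injEq, Char.reduceEq, and_true, and_self, or_false, if_true, if_false]
          rw [show (done ++ '{' :: ':' :: t2 : List Char) = done ++ (['{', ':'] ++ t2) from rfl]
          rw [pvReplaceFirst_append done ['{', ':'] _ t2 (by simp)
              (fun j hj => hNBL j hj ['{', ':'] (by simp [pvIsTok]))]
          have hfuel' : (pvEmit (List.replicate (2 * (ind + 1).toNat) ' ' ++ t2) (ind + 1)).length ≤ fuel := by
            rw [pvEmit] at hfuel
            simp only [List.cons.injEq, Char.reduceEq, and_true, and_self, if_true, if_false, List.length_cons, List.length_append,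
              List.length_replicate] at hfuel
            rw [pvEmit_replicate_space]
            simp only [List.length_append, List.length_replicate]
            omega
          have hN : pvNBL ((done ++ ['\n']) ++ (List.replicate (2 * (ind + 1).toNat) ' ' ++ t2))
              ((done ++ ['\n']).length) := by
            intro j hj tok htok hpre
            simp only [List.length_append, List.length_cons, List.length_nil] at hj
            have eL : (done ++ ['\n']) ++ (List.replicate (2 * (ind + 1).toNat) ' ' ++ t2)
                = done ++ ('\n' :: (List.replicate (2 * (ind + 1).toNat) ' ' ++ t2)) := by simp
            rw [eL] at hpre
            rcases Nat.lt_or_ge (j + 1) done.length with hj' | hj'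
            · have hp2 := pvNBL_window done _ (by omega) (pvIsTok_len htok) hpre
              exact hNBL j (by omega) tok htok (by
                rw [List.drop_append_of_le_length (by omega)]
                exact hp2.trans (List.prefix_append _ _))
            · rcases Nat.lt_or_ge j done.length with hj2 | hj2
              · obtain ⟨a, ha⟩ := pvDrop_pred done
                  ('\n' :: (List.replicate (2 * (ind + 1).toNat) ' ' ++ t2)) (by omega)
                rw [show j = done.length - 1 by omega, ha] at hpre
                have ht := prefix_take_two (pvIsTok_len htok) hpre
                simp only [List.take_succ_cons, List.take_zero] at ht
                rcases htok with h | h | h <;> subst h <;> simp at ht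
              · have hje : j = done.length := by omega
                subst hje
                rw [List.drop_left] at hpre
                have ht := prefix_take_two (pvIsTok_len htok) hpre
                simp only [List.take_succ_cons] at ht
                rcases htok with h | h | h <;> subst h <;> simp at ht
          have hrec := ih (done ++ ['\n']) (List.replicate (2 * (ind + 1).toNat) ' ' ++ t2)
              (pvStripBlank (done ++ '\n' :: (List.replicate (2 * (ind + 1).toNat) ' ' ++ t2)))
              (ind + 1) hN hfuel'
          simp only [List.append_assoc, List.cons_append,
            List.length_append, List.length_cons, List.length_nil, List.nil_append, Nat.zero_add] at hrec ⊢
          rw [hrec, pvEmit]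
          simp only [List.cons.injEq, Char.reduceEq, and_true, and_self, if_true, if_false]
          by_cases hE : List.replicate (2 * (ind + 1).toNat) ' ' ++ t2 = ([] : List Char)
          · rw [if_pos hE]
            simp only [List.append_eq_nil_iff, List.replicate_eq_nil_iff] at hE
            obtain ⟨hk, ht2⟩ := hE
            subst ht2
            simp [pvEmit, hk]
          · rw [if_neg hE, pvEmit_replicate_space]
            simp
        · by_cases h2 : ([c1, c2] : List Char) = [':', '}']
          · obtain ⟨rfl, rfl⟩ : c1 = ':' ∧ c2 = '}' := by simpa using h2
            simp only [List.take_succ_cons, List.take_zero, List.cons.injEq, Char.reduceEq, and_true, and_self, or_true, or_false, if_true, if_false]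
            rw [show (done ++ ':' :: '}' :: t2 : List Char) = done ++ ([':', '}'] ++ t2) from rfl]
            rw [pvReplaceFirst_append done [':', '}'] _ t2 (by simp)
                (fun j hj => hNBL j hj [':', '}'] (by simp [pvIsTok]))]
            have hfuel' : (pvEmit (List.replicate (2 * (ind - 1).toNat) ' ' ++ t2) (ind - 1)).length ≤ fuel := by
              rw [pvEmit] at hfuel
              simp only [List.cons.injEq, Char.reduceEq, and_true, and_self, if_true, if_false, List.length_cons, List.length_append,
                List.length_replicate] at hfuel
              rw [pvEmit_replicate_space]
              simp only [List.length_append, List.length_replicate]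
              omega
            have hN : pvNBL ((done ++ ['\n']) ++ (List.replicate (2 * (ind - 1).toNat) ' ' ++ t2))
                ((done ++ ['\n']).length) := by
              intro j hj tok htok hpre
              simp only [List.length_append, List.length_cons, List.length_nil] at hj
              have eL : (done ++ ['\n']) ++ (List.replicate (2 * (ind - 1).toNat) ' ' ++ t2)
                  = done ++ ('\n' :: (List.replicate (2 * (ind - 1).toNat) ' ' ++ t2)) := by simp
              rw [eL] at hpre
              rcases Nat.lt_or_ge (j + 1) done.length with hj' | hj'
              · have hp2 := pvNBL_window done _ (by omega) (pvIsTok_len htok) hpre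
                exact hNBL j (by omega) tok htok (by
                  rw [List.drop_append_of_le_length (by omega)]
                  exact hp2.trans (List.prefix_append _ _))
              · rcases Nat.lt_or_ge j done.length with hj2 | hj2
                · obtain ⟨a, ha⟩ := pvDrop_pred done
                    ('\n' :: (List.replicate (2 * (ind - 1).toNat) ' ' ++ t2)) (by omega)
                  rw [show j = done.length - 1 by omega, ha] at hpre
                  have ht := prefix_take_two (pvIsTok_len htok) hpre
                  simp only [List.take_succ_cons, List.take_zero] at ht
                  rcases htok with h | h | h <;> subst h <;> simp at ht
                · have hje : j = done.length := by omega
                  subst hje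
                  rw [List.drop_left] at hpre
                  have ht := prefix_take_two (pvIsTok_len htok) hpre
                  simp only [List.take_succ_cons] at ht
                  rcases htok with h | h | h <;> subst h <;> simp at ht
            have hrec := ih (done ++ ['\n']) (List.replicate (2 * (ind - 1).toNat) ' ' ++ t2)
                (pvStripBlank (done ++ '\n' :: (List.replicate (2 * (ind - 1).toNat) ' ' ++ t2)))
                (ind - 1) hN hfuel'
            simp only [List.append_assoc, List.cons_append,
              List.length_append, List.length_cons, List.length_nil, List.nil_append, Nat.zero_add] at hrec ⊢
            rw [hrec, pvEmit]
            simp only [List.cons.injEq, Char.reduceEq, and_true, and_self, if_true, if_false]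
            by_cases hE : List.replicate (2 * (ind - 1).toNat) ' ' ++ t2 = ([] : List Char)
            · rw [if_pos hE]
              simp only [List.append_eq_nil_iff, List.replicate_eq_nil_iff] at hE
              obtain ⟨hk, ht2⟩ := hE
              subst ht2
              simp [pvEmit]
            · rw [if_neg hE, pvEmit_replicate_space]
              simp
          · by_cases h3 : ([c1, c2] : List Char) = ['\\', 'n']
            · obtain ⟨rfl, rfl⟩ : c1 = '\\' ∧ c2 = 'n' := by simpa using h3
              simp only [List.take_succ_cons, List.take_zero, List.cons.injEq, Char.reduceEq, and_true, and_self, or_true, if_true, if_false]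
              rw [show (done ++ '\\' :: 'n' :: t2 : List Char) = done ++ (['\\', 'n'] ++ t2) from rfl]
              rw [pvReplaceFirst_append done ['\\', 'n'] _ t2 (by simp)
                  (fun j hj => hNBL j hj ['\\', 'n'] (by simp [pvIsTok]))]
              have hfuel' : (pvEmit (List.replicate (2 * (ind).toNat) ' ' ++ t2) (ind)).length ≤ fuel := by
                rw [pvEmit] at hfuel
                simp only [List.cons.injEq, Char.reduceEq, and_true, and_self, if_true, if_false, List.length_cons, List.length_append,
                  List.length_replicate] at hfuel
                rw [pvEmit_replicate_space]
                simp only [List.length_append, List.length_replicate]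
                omega
              have hN : pvNBL ((done ++ ['\n']) ++ (List.replicate (2 * (ind).toNat) ' ' ++ t2))
                  ((done ++ ['\n']).length) := by
                intro j hj tok htok hpre
                simp only [List.length_append, List.length_cons, List.length_nil] at hj
                have eL : (done ++ ['\n']) ++ (List.replicate (2 * (ind).toNat) ' ' ++ t2)
                    = done ++ ('\n' :: (List.replicate (2 * (ind).toNat) ' ' ++ t2)) := by simp
                rw [eL] at hpre
                rcases Nat.lt_or_ge (j + 1) done.length with hj' | hj'
                · have hp2 := pvNBL_window done _ (by omega) (pvIsTok_len htok) hpre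
                  exact hNBL j (by omega) tok htok (by
                    rw [List.drop_append_of_le_length (by omega)]
                    exact hp2.trans (List.prefix_append _ _))
                · rcases Nat.lt_or_ge j done.length with hj2 | hj2
                  · obtain ⟨a, ha⟩ := pvDrop_pred done
                      ('\n' :: (List.replicate (2 * (ind).toNat) ' ' ++ t2)) (by omega)
                    rw [show j = done.length - 1 by omega, ha] at hpre
                    have ht := prefix_take_two (pvIsTok_len htok) hpre
                    simp only [List.take_succ_cons, List.take_zero] at ht
                    rcases htok with h | h | h <;> subst h <;> simp at ht
                  · have hje : j = done.length := by omega
                    subst hje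
                    rw [List.drop_left] at hpre
                    have ht := prefix_take_two (pvIsTok_len htok) hpre
                    simp only [List.take_succ_cons] at ht
                    rcases htok with h | h | h <;> subst h <;> simp at ht
              have hrec := ih (done ++ ['\n']) (List.replicate (2 * (ind).toNat) ' ' ++ t2)
                  (pvStripBlank (done ++ '\n' :: (List.replicate (2 * (ind).toNat) ' ' ++ t2)))
                  (ind) hN hfuel'
              simp only [List.append_assoc, List.cons_append,
                List.length_append, List.length_cons, List.length_nil, List.nil_append, Nat.zero_add] at hrec ⊢
              rw [hrec, pvEmit]
              simp only [List.cons.injEq, Char.reduceEq, and_true, and_self, if_true, if_false]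
              by_cases hE : List.replicate (2 * (ind).toNat) ' ' ++ t2 = ([] : List Char)
              · rw [if_pos hE]
                simp only [List.append_eq_nil_iff, List.replicate_eq_nil_iff] at hE
                obtain ⟨hk, ht2⟩ := hE
                subst ht2
                simp [pvEmit, hk]
              · rw [if_neg hE, pvEmit_replicate_space]
                simp
            · -- no marker: copy one character
              have ht1 : ¬ (c1 :: c2 :: t2).take 2 = ['{', ':'] := by simpa using h1
              have ht2 : ¬ (c1 :: c2 :: t2).take 2 = [':', '}'] := by simpa using h2
              have ht3 : ¬ (c1 :: c2 :: t2).take 2 = ['\\', 'n'] := by simpa using h3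
              rw [if_neg ht1, if_neg ht2, if_neg (by simp only [not_or]; exact ⟨ht1, ht2, ht3⟩)]
              have e : (done ++ [c1]) ++ (c2 :: t2) = done ++ c1 :: c2 :: t2 := by simp
              have hrec := ih (done ++ [c1]) (c2 :: t2) (pvStripBlank (done ++ c1 :: c2 :: t2)) ind
                (by
                  intro j hj tok htok hpre
                  rw [e] at hpre
                  rcases Nat.lt_or_ge j done.length with hj' | hj'
                  · exact hNBL j hj' tok htok hpre
                  · have hje : j = done.length := by simp at hj; omega
                    subst hje
                    rw [List.drop_left] at hpre
                    have ht := prefix_take_two (pvIsTok_len htok) hpre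
                    simp only [List.take_succ_cons, List.take_zero] at ht
                    rcases htok with h | h | h <;> subst h
                    · exact h1 ht.symm
                    · exact h2 ht.symm
                    · exact h3 ht.symm)
                (by
                  rw [pvEmit, if_neg h1, if_neg h2, if_neg h3] at hfuel
                  simp only [List.length_cons] at hfuel; omega)
              simp only [e, List.length_append, List.length_cons, List.length_nil] at hrec
              rw [hrec]
              rw [pvEmit, if_neg h1, if_neg h2, if_neg h3]
              simp


-- ===== VERDICT (by name: the statement is the Claim_ definition above) =====
theorem python_filter_spec : Claim_equal_python_filter := by
  intro txt _
  unfold Spec_python_filter python_filter python_filter_alt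
  simp only [List.foldl]
  set t := PySem.Chars.replace
      (PySem.Chars.replace
        (PySem.Chars.replace
          (PySem.Chars.replace (PySem.Chars.replace txt.toList ['\\', 'l', 'e'] ['<', '='])
            ['\\', 'g', 'e'] ['>', '=']) ['\\', 'l'] ['<']) ['\\', 'g'] ['>'])
      ['\\', 'e', 'b'] ['|'] with ht
  have hmain := pvLoopA_emit (t.length * t.length + 1) [] t t 0 (by
      intro j hj; simp at hj) (by
      have := pvEmit_len_le t.length t 0 le_rfl
      simp at this; omega)
  simp only [List.nil_append, List.length_nil] at hmain
  rw [hmain]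
  by_cases h : t = []
  · rw [if_pos h, h]; decide
  · rw [if_neg h]
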